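-- pv_equiv track=rewrite | github.com/HerbMat/algorithms-python | groups/divide_to_groups_incrementaly.py | make_new_group
-- ===== SOURCE A (Python) =====
-- def make_new_group(arr: list[int]) -> list[int]:
--     new_group = arr.copy()
--     length = len(new_group)
--     index_giver = 0
--     index_receiver = 0
--     for i in range(1, length):
--         if new_group[i] == new_group[index_giver]:
--             index_giver = i
--         elif new_group[i] + 1 <= new_group[index_giver] - 1:
--             index_receiver = i
--             break
--
--     if index_receiver > 0:
--         new_group[index_giver] = new_group[index_giver] - 1
--         new_group[index_receiver] = new_group[index_receiver] + 1
--     return new_group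
-- ===== SOURCE B (Python) =====
-- def make_new_group(arr: list[int]) -> list[int]:
--     if not arr:
--         return []
--     v = arr[0]
--     receiver = 0
--     for j in range(1, len(arr)):
--         if arr[j] <= v - 2:
--             receiver = j
--             break
--     if receiver == 0:
--         return arr.copy()
--     giver = 0
--     for j in range(receiver - 1, 0, -1):
--         if arr[j] == v:
--             giver = j
--             break
--     return [x - 1 if i == giver else x + 1 if i == receiver else x
--             for i, x in enumerate(arr)]
-- ===== Notes on version B (the rewrite author's own statement) =====
-- stated objective: simpler
-- what changed: Replaces A's single interleaved tracking pass with in-place mutation by two short scans (forward first-receiver search, backward last-giver search) and a pure comprehension rebuild, exploiting the invariant that the giver's value always equals the first element.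
import Mathlib
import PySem

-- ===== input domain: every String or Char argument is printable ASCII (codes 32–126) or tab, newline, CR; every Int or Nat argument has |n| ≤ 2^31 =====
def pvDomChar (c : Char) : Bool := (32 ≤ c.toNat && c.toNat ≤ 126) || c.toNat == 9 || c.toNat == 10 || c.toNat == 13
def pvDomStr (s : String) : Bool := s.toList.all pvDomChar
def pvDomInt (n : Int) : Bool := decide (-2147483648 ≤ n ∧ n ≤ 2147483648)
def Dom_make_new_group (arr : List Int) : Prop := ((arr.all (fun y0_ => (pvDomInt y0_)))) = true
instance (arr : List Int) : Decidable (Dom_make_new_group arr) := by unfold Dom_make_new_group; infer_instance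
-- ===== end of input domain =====

-- B replaces A's interleaved giver/receiver tracking pass (with in-place mutation) by two
-- short scans plus a pure rebuild: same return value, simpler decomposition (no speed claim).

-- ===== PORT A =====
-- A's for-loop with break: state (index_giver, index_receiver); all list indices i, g
-- are Nats with 0 ≤ g < i < length, so Python new_group[i] is exactly getD i 0 here.
def loopA (ng : List Int) (g i : Nat) : Nat × Nat :=
  if _h : i < ng.length then
    if ng.getD i 0 = ng.getD g 0 then loopA ng i (i+1)
    else if ng.getD i 0 + 1 ≤ ng.getD g 0 - 1 then (g, i)
    else loopA ng g (i+1)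
  else (g, 0)
termination_by ng.length - i

def make_new_group (arr : List Int) : List Int :=
  let new_group := arr
  let p := loopA new_group 0 1
  if p.2 > 0 then
    let ng1 := new_group.set p.1 (new_group.getD p.1 0 - 1)
    ng1.set p.2 (ng1.getD p.2 0 + 1)
  else new_group

-- ===== PORT B =====
-- first j in [1, len) with arr[j] <= v - 2, else 0 (Source B's forward break loop)
def findRecv (arr : List Int) (v : Int) (j : Nat) : Nat :=
  if _h : j < arr.length then
    if arr.getD j 0 ≤ v - 2 then j else findRecv arr v (j+1)
  else 0
termination_by arr.length - j

-- backward loop range(r-1, 0, -1): first j counting down with arr[j] == v, else 0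
def findGiver (arr : List Int) (v : Int) (j : Nat) : Nat :=
  if j = 0 then 0
  else if arr.getD j 0 = v then j
  else findGiver arr v (j-1)
termination_by j
decreasing_by omega

-- the comprehension over enumerate(arr)
def rebuild (g r i : Nat) : List Int → List Int
  | [] => []
  | x :: xs => (if i = g then x - 1 else if i = r then x + 1 else x) :: rebuild g r (i+1) xs

def make_new_group_alt (arr : List Int) : List Int :=
  match arr with
  | [] => []
  | v :: _ =>
    let r := findRecv arr v 1
    if r = 0 then arr
    else rebuild (findGiver arr v (r - 1)) r 0 arr

-- ===== PRECONDITION & SPEC =====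
def Spec_make_new_group (arr : List Int) (out : List Int) : Prop := out = make_new_group_alt arr
instance (arr : List Int) (out : List Int) : Decidable (Spec_make_new_group arr out) := by unfold Spec_make_new_group; infer_instance

-- ===== CLAIM (what is proved, stated in full; the proofs are below) =====
def Claim_equal_make_new_group : Prop := ∀ (arr : List Int), Dom_make_new_group arr → Spec_make_new_group arr (make_new_group arr)

-- ===== LEMMAS AND PROOFS =====

lemma findRecv_spec (arr : List Int) (v : Int) :
    ∀ j, findRecv arr v j ≠ 0 →
      j ≤ findRecv arr v j ∧ findRecv arr v j < arr.length ∧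
      arr.getD (findRecv arr v j) 0 ≤ v - 2 := by
  intro j
  induction j using findRecv.induct arr v with
  | case1 j h hc => intro _; rw [findRecv, dif_pos h, if_pos hc]; exact ⟨le_rfl, h, hc⟩
  | case2 j h hc ih =>
      intro hne
      rw [findRecv, dif_pos h, if_neg hc] at hne ⊢
      obtain ⟨h1, h2, h3⟩ := ih hne
      exact ⟨by omega, h2, h3⟩
  | case3 j h => intro hne; rw [findRecv, dif_neg h] at hne; exact absurd rfl hne

lemma findGiver_le (arr : List Int) (v : Int) : ∀ j, findGiver arr v j ≤ j := by
  intro j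
  induction j using findGiver.induct arr v with
  | case1 => rw [findGiver]; simp
  | case2 j h hc => rw [findGiver, if_neg h, if_pos hc]
  | case3 j h hc ih => rw [findGiver, if_neg h, if_neg hc]; omega

lemma bridge (arr : List Int) (v : Int) :
    ∀ n i g, arr.length ≤ i + n → 1 ≤ i → arr.getD g 0 = v →
      g = findGiver arr v (i - 1) →
      (loopA arr g i).2 = findRecv arr v i ∧
      (findRecv arr v i ≠ 0 →
        (loopA arr g i).1 = findGiver arr v (findRecv arr v i - 1)) := by
  intro n
  induction n with
  | zero =>
      intro i g hn _ _ _
      rw [loopA, findRecv]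
      have : ¬ i < arr.length := by omega
      simp [this]
  | succ n ih =>
      intro i g hn hi hg hfg
      by_cases h : i < arr.length
      · by_cases he : arr.getD i 0 = arr.getD g 0
        · -- giver update
          have hv : arr.getD i 0 = v := by rw [he, hg]
          have hnr : ¬ arr.getD i 0 ≤ v - 2 := by omega
          have hA : loopA arr g i = loopA arr i (i+1) := by
            rw [loopA, dif_pos h, if_pos he]
          have hR : findRecv arr v i = findRecv arr v (i+1) := by
            rw [findRecv, dif_pos h, if_neg hnr]
          have hgi : i = findGiver arr v (i + 1 - 1) := by
            rw [Nat.add_sub_cancel, findGiver, if_neg (by omega : ¬ i = 0), if_pos hv]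
          rw [hA, hR]
          exact ih (i+1) i (by omega) (by omega) hv hgi
        · by_cases hrc : arr.getD i 0 + 1 ≤ arr.getD g 0 - 1
          · -- receiver found
            have hr' : arr.getD i 0 ≤ v - 2 := by rw [← hg]; omega
            have hA : loopA arr g i = (g, i) := by
              rw [loopA, dif_pos h, if_neg he, if_pos hrc]
            have hR : findRecv arr v i = i := by
              rw [findRecv, dif_pos h, if_pos hr']
            rw [hA, hR]
            exact ⟨rfl, fun _ => hfg⟩
          · -- skip
            have hne : arr.getD i 0 ≠ v := by rw [← hg]; exact he
            have hnr : ¬ arr.getD i 0 ≤ v - 2 := by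
              intro hc; apply hrc; rw [hg]; omega
            have hA : loopA arr g i = loopA arr g (i+1) := by
              rw [loopA, dif_pos h, if_neg he, if_neg hrc]
            have hR : findRecv arr v i = findRecv arr v (i+1) := by
              rw [findRecv, dif_pos h, if_neg hnr]
            have hgi : g = findGiver arr v (i + 1 - 1) := by
              rw [Nat.add_sub_cancel, findGiver, if_neg (by omega : ¬ i = 0), if_neg hne]
              exact hfg
            rw [hA, hR]
            exact ih (i+1) g (by omega) (by omega) hg hgi
      · have hA : loopA arr g i = (g, 0) := by rw [loopA, dif_neg h]
        have hR : findRecv arr v i = 0 := by rw [findRecv, dif_neg h]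
        rw [hA, hR]
        exact ⟨rfl, fun hc => absurd rfl hc⟩

lemma rebuild_length (g r : Nat) : ∀ (xs : List Int) (i : Nat), (rebuild g r i xs).length = xs.length := by
  intro xs
  induction xs with
  | nil => intro i; rfl
  | cons x xs ih => intro i; simp [rebuild, ih]

lemma rebuild_getElem (g r : Nat) :
    ∀ (xs : List Int) (i k : Nat) (hk : k < xs.length),
      (rebuild g r i xs)[k]'(by rw [rebuild_length]; exact hk) =
        if i + k = g then xs[k] - 1 else if i + k = r then xs[k] + 1 else xs[k] := by
  intro xs
  induction xs with
  | nil => intro i k hk; simp at hk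
  | cons x xs ih =>
      intro i k hk
      cases k with
      | zero => simp [rebuild]
      | succ k =>
          have hk' : k < xs.length := by simpa using hk
          have := ih (i+1) k hk'
          simp only [rebuild, List.getElem_cons_succ]
          rw [this]
          have e1 : i + 1 + k = i + (k + 1) := by omega
          rw [e1]

lemma setset_eq_rebuild (a : List Int) (g r : Nat)
    (hg : g < a.length) (hr : r < a.length) (hne : g ≠ r) :
    (a.set g (a.getD g 0 - 1)).set r ((a.set g (a.getD g 0 - 1)).getD r 0 + 1)
      = rebuild g r 0 a := by
  have hgetg : a.getD g 0 = a[g] := List.getD_eq_getElem a 0 hg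
  have hgetr : (a.set g (a[g] - 1)).getD r 0 = a[r] := by
    rw [List.getD_eq_getElem _ 0 (by simpa using hr), List.getElem_set]
    simp [hne]
  apply List.ext_getElem
  · simp [rebuild_length]
  · intro k h1 h2
    rw [rebuild_length] at h2
    rw [rebuild_getElem g r a 0 k h2]
    simp only [Nat.zero_add]
    rw [List.getElem_set, List.getElem_set]
    simp only [hgetg]
    simp only [hgetr]
    by_cases hkr : r = k
    · subst hkr; simp [Ne.symm hne]
    · by_cases hkg : g = k
      · subst hkg; simp [hkr]
      · rw [if_neg hkr, if_neg hkg, if_neg (fun h => hkg h.symm), if_neg (fun h => hkr h.symm)]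

lemma loopA_nil : loopA ([] : List Int) 0 1 = (0, 0) := by
  rw [loopA]; simp

theorem make_new_group_spec_aux : ∀ (arr : List Int), make_new_group arr = make_new_group_alt arr := by
  intro arr
  match arr with
  | [] => simp [make_new_group, make_new_group_alt, loopA_nil]
  | v :: tl =>
    have hv : (v :: tl).getD 0 0 = v := rfl
    have hg0 : (0 : Nat) = findGiver (v :: tl) v (1 - 1) := by rw [findGiver]; norm_num
    have hb := bridge (v :: tl) v (v :: tl).length 1 0 (by omega) (by omega) hv hg0
    show (if (loopA (v::tl) 0 1).2 > 0 then
            ((v::tl).set (loopA (v::tl) 0 1).1 ((v::tl).getD (loopA (v::tl) 0 1).1 0 - 1)).set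
              (loopA (v::tl) 0 1).2
              (((v::tl).set (loopA (v::tl) 0 1).1 ((v::tl).getD (loopA (v::tl) 0 1).1 0 - 1)).getD
                (loopA (v::tl) 0 1).2 0 + 1)
          else v::tl)
        = (if findRecv (v::tl) v 1 = 0 then v::tl
           else rebuild (findGiver (v::tl) v (findRecv (v::tl) v 1 - 1)) (findRecv (v::tl) v 1) 0 (v::tl))
    rw [hb.1]
    by_cases hr0 : findRecv (v::tl) v 1 = 0
    · simp [hr0]
    · have hrs := findRecv_spec (v::tl) v 1 hr0
      rw [hb.2 hr0]
      set r := findRecv (v::tl) v 1 with hrdef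
      set g := findGiver (v::tl) v (r - 1) with hgdef
      have hgr : g ≤ r - 1 := findGiver_le (v::tl) v (r - 1)
      have hglen : g < (v::tl).length := by omega
      have hrlen : r < (v::tl).length := hrs.2.1
      have hgne : g ≠ r := by omega
      rw [if_pos (by omega), if_neg hr0]
      exact setset_eq_rebuild (v::tl) g r hglen hrlen hgne

-- ===== VERDICT (by name: the statement is the Claim_ definition above) =====
theorem make_new_group_spec : Claim_equal_make_new_group := by
  intro arr _
  unfold Spec_make_new_group
  exact make_new_group_spec_aux arr
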